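-- pv_equiv track=rewrite | github.com/suprith41/sudowoodo | backend/pipeline/validator.py | _extract_json_slice
-- ===== SOURCE A (Python) =====
-- def _extract_json_slice(raw_output: str) -> str:
--     first_object = raw_output.find("{")
--     first_array = raw_output.find("[")
--     start_candidates = [index for index in (first_object, first_array) if index != -1]
--     if not start_candidates:
--         return raw_output
--
--     start_index = min(start_candidates)
--     end_object = raw_output.rfind("}")
--     end_array = raw_output.rfind("]")
--     end_index = max(end_object, end_array)
--     if end_index == -1 or end_index < start_index:
--         return raw_output[start_index:]
--
--     return raw_output[start_index : end_index + 1]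
-- ===== SOURCE B (Python) =====
-- def _extract_json_slice(raw_output: str) -> str:
--     suffix = raw_output
--     while suffix and suffix[0] not in "{[":
--         suffix = suffix[1:]
--     if not suffix:
--         return raw_output
--     trimmed = suffix
--     while trimmed and trimmed[-1] not in "}]":
--         trimmed = trimmed[:-1]
--     if not trimmed:
--         return suffix
--     return trimmed
-- ===== Notes on version B (the rewrite author's own statement) =====
-- stated objective: alternative
-- what changed: Instead of computing first/last bracket indices with find/rfind plus min/max over -1 sentinels and slicing between them, B trims the string in place: it drops leading characters until an opening bracket, then drops trailing characters until a closing bracket, and an empty right trim signals that no closing bracket follows the opener.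
import Mathlib
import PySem

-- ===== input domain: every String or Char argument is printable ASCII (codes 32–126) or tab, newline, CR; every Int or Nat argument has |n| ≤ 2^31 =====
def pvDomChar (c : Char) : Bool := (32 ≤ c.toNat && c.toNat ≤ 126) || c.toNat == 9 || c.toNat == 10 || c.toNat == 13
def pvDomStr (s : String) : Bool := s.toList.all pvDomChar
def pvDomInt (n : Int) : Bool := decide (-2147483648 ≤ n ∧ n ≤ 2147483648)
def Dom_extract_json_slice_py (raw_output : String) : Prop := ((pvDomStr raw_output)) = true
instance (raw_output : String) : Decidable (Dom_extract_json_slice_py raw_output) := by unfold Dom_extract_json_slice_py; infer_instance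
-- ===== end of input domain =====

-- B replaces A's index computation (find/rfind of the four brackets, min/max over
-- -1 sentinels, slice between the indices) with two-sided trimming: drop leading
-- characters until an opener, then drop trailing characters until a closer; the
-- "no closer at or after the opener" case falls out as an empty trim (not faster:
-- the repeated slicing makes B quadratic in CPython).

-- ===== PORT A =====
def extract_json_slice_py (raw_output : String) : String :=
  let first_object := PySem.Str.find raw_output "{"
  let first_array := PySem.Str.find raw_output "["
  let start_candidates := [first_object, first_array].filter (fun i => decide (i ≠ -1))
  match PySem.List.min? start_candidates (fun x => x) with
  | none => raw_output                       -- "if not start_candidates: return raw_output"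
  | some start_index =>
    let end_object := PySem.Str.rfind raw_output "}"
    let end_array := PySem.Str.rfind raw_output "]"
    let end_index := max end_object end_array
    if end_index == -1 || end_index < start_index then
      PySem.Str.slice raw_output (some start_index) none
    else
      PySem.Str.slice raw_output (some start_index) (some (end_index + 1))

-- ===== PORT B =====
-- "while suffix and suffix[0] not in '{[': suffix = suffix[1:]"
def pvLTrim : List Char → List Char
  | [] => []
  | c :: rest => if c == '{' || c == '[' then c :: rest else pvLTrim rest

-- "while trimmed and trimmed[-1] not in '}]': trimmed = trimmed[:-1]"
-- (fuel = the list length: each iteration drops the last element)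
def pvRTrimGo : Nat → List Char → List Char
  | 0, l => l
  | n + 1, l =>
    match l.getLast? with
    | none => l
    | some c => if c == '}' || c == ']' then l else pvRTrimGo n l.dropLast

def pvRTrim (l : List Char) : List Char := pvRTrimGo l.length l

def extract_json_slice_py_alt (raw_output : String) : String :=
  let suffix := pvLTrim raw_output.toList
  if suffix.isEmpty then raw_output
  else
    let trimmed := pvRTrim suffix
    if trimmed.isEmpty then String.ofList suffix
    else String.ofList trimmed

-- ===== PRECONDITION & SPEC =====
def Spec_extract_json_slice_py (raw_output : String) (out : String) : Prop := out = extract_json_slice_py_alt raw_output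
instance (raw_output : String) (out : String) : Decidable (Spec_extract_json_slice_py raw_output out) := by unfold Spec_extract_json_slice_py; infer_instance

-- ===== CLAIM (what is proved, stated in full; the proofs are below) =====
def Claim_equal_extract_json_slice_py : Prop := ∀ (raw_output : String), Dom_extract_json_slice_py raw_output → Spec_extract_json_slice_py raw_output (extract_json_slice_py raw_output)

-- ===== LEMMAS AND PROOFS =====

-- Python's min over the nonneg-filtered two-element candidate list, as a total function
def pvMin2 (a b : Int) : Int := if a = -1 then b else if b = -1 then a else min a b

-- A's first-opener index and last-closer index, as functions of the char list
def pvF (l : List Char) : Int := pvMin2 (PySem.Chars.find l ['{']) (PySem.Chars.find l ['['])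
def pvR (l : List Char) : Int := max (PySem.Chars.rfind l ['}']) (PySem.Chars.rfind l [']'])

theorem pvFind_go_eq (b : Char) (t : List Char) (k : Nat) :
    PySem.Chars.find.go [b] t k =
      if PySem.Chars.find t [b] = -1 then -1 else (k : Int) + PySem.Chars.find t [b] := by
  induction t generalizing k with
  | nil => simp [PySem.Chars.find.go, PySem.Chars.find]
  | cons h r ih =>
      have h1 := ih (k + 1)
      have h2 := ih 1
      have hge := PySem.Chars.neg_one_le_find r [b]
      simp only [PySem.Chars.find, PySem.Chars.find.go] at *
      by_cases hp : [b].isPrefixOf (h :: r) = true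
      · simp [hp]
      · simp only [hp] at *
        rw [h1, h2]
        split_ifs with hf <;> simp [hf] <;> omega

theorem pvFind_cons (b c : Char) (t : List Char) :
    PySem.Chars.find (c :: t) [b] =
      if c = b then 0
      else if PySem.Chars.find t [b] = -1 then -1 else PySem.Chars.find t [b] + 1 := by
  have h1 := pvFind_go_eq b t 1
  have hge := PySem.Chars.neg_one_le_find t [b]
  have hp : ([b].isPrefixOf (c :: t)) = (b == c) := by simp [List.isPrefixOf]
  conv_lhs => rw [show PySem.Chars.find (c :: t) [b] =
      (if [b].isPrefixOf (c :: t) then (0 : Int) else PySem.Chars.find.go [b] t 1) from by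
        simp [PySem.Chars.find, PySem.Chars.find.go]]
  rw [hp, h1]
  by_cases hcb : c = b
  · simp [hcb]
  · have hbc : (b == c) = false := by simp [Ne.symm hcb]
    rw [hbc]
    simp only [Bool.false_eq_true, if_false, if_neg hcb]
    split_ifs with hf
    · rfl
    · omega

theorem pvRfind_nil (b : Char) : PySem.Chars.rfind [] [b] = -1 := by
  simp [PySem.Chars.rfind, PySem.Chars.rfind.go, List.isPrefixOf]

theorem pvRfind_go_cons (b c : Char) (t : List Char) (m : Nat) :
    PySem.Chars.rfind.go (c :: t) [b] (m + 1) =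
      if PySem.Chars.rfind.go t [b] m = -1 then (if c = b then 0 else -1)
      else PySem.Chars.rfind.go t [b] m + 1 := by
  induction m with
  | zero =>
      have hp : ([b].isPrefixOf (c :: t)) = (b == c) := by simp [List.isPrefixOf]
      simp only [PySem.Chars.rfind.go, List.drop_succ_cons, List.drop_zero, hp]
      by_cases hpt : [b].isPrefixOf t = true
      · simp [hpt]
      · by_cases hcb : c = b <;> simp [hpt, hcb, Ne.symm]
  | succ m ih =>
      have hd : List.drop (m + 1 + 1) (c :: t) = List.drop (m + 1) t := List.drop_succ_cons
      conv_lhs => rw [show PySem.Chars.rfind.go (c :: t) [b] (m + 1 + 1) =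
        (if [b].isPrefixOf (List.drop (m + 1 + 1) (c :: t)) then ((m + 1 + 1 : Nat) : Int)
         else PySem.Chars.rfind.go (c :: t) [b] (m + 1)) from by
          simp [PySem.Chars.rfind.go]]
      rw [hd]
      conv_rhs => rw [show PySem.Chars.rfind.go t [b] (m + 1) =
        (if [b].isPrefixOf (List.drop (m + 1) t) then ((m + 1 : Nat) : Int)
         else PySem.Chars.rfind.go t [b] m) from by
          simp [PySem.Chars.rfind.go]]
      by_cases hpt : [b].isPrefixOf (List.drop (m + 1) t) = true
      · rw [if_pos hpt, if_pos hpt, if_neg (by push_cast; omega)]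
        push_cast; ring
      · rw [if_neg hpt, if_neg hpt, ih]

theorem pvRfind_ge (b : Char) (t : List Char) : -1 ≤ PySem.Chars.rfind t [b] := by
  induction t with
  | nil => rw [pvRfind_nil]
  | cons c r _ =>
      have h := pvRfind_go_cons b c r r.length
      simp only [PySem.Chars.rfind, List.length_cons] at *
      rw [h]
      split_ifs <;> omega

theorem pvRfind_cons (b c : Char) (t : List Char) :
    PySem.Chars.rfind (c :: t) [b] =
      if PySem.Chars.rfind t [b] = -1 then (if c = b then 0 else -1)
      else PySem.Chars.rfind t [b] + 1 := by
  have := pvRfind_go_cons b c t t.length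
  simp only [PySem.Chars.rfind, List.length_cons]
  exact this

-- cons characterisation of the first-opener index
theorem pvF_cons (c : Char) (t : List Char) :
    pvF (c :: t) = if c = '{' ∨ c = '[' then 0
      else if pvF t = -1 then -1 else pvF t + 1 := by
  have go := PySem.Chars.neg_one_le_find t ['{']
  have ga := PySem.Chars.neg_one_le_find t ['[']
  by_cases hc : c = '{' ∨ c = '['
  · rw [if_pos hc]
    simp only [pvF, pvMin2, pvFind_cons]
    rcases hc with h | h <;> subst h <;> norm_num <;> split_ifs <;> omega
  · rw [if_neg hc]
    have h1 : c ≠ '{' := fun h => hc (Or.inl h)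
    have h2 : c ≠ '[' := fun h => hc (Or.inr h)
    simp only [pvF, pvMin2, pvFind_cons, if_neg h1, if_neg h2, min_def]
    split_ifs <;> omega

theorem pvF_bounds (l : List Char) (h : pvF l ≠ -1) :
    0 ≤ pvF l ∧ pvF l < l.length := by
  induction l with
  | nil => simp [pvF, pvMin2, PySem.Chars.find, PySem.Chars.find.go] at h
  | cons c t ih =>
      rw [pvF_cons] at *
      by_cases hc : c = '{' ∨ c = '[' <;> simp only [hc, if_true, if_false] at *
      · simp
      · by_cases hf : pvF t = -1
        · simp [hf] at h
        · have := ih hf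
          simp only [hf, if_false, List.length_cons]
          push_cast; omega

-- the left trim is A's drop-at-first-opener
theorem pvLTrim_eq (l : List Char) :
    pvLTrim l = if pvF l = -1 then [] else l.drop (pvF l).toNat := by
  induction l with
  | nil => simp [pvLTrim, pvF, pvMin2, PySem.Chars.find, PySem.Chars.find.go]
  | cons c t ih =>
      rw [pvF_cons]
      by_cases hc : c = '{' ∨ c = '['
      · have hb : (c == '{' || c == '[') = true := by
          rcases hc with h | h <;> simp [h]
        simp [pvLTrim, hb, hc]
      · have hb : (c == '{' || c == '[') = false := by
          simp only [Bool.or_eq_false_iff, beq_eq_false_iff_ne]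
          exact ⟨fun h => hc (Or.inl h), fun h => hc (Or.inr h)⟩
        simp only [pvLTrim, hb, Bool.false_eq_true, if_false, hc]
        rw [ih]
        by_cases hf : pvF t = -1
        · simp [hf]
        · have hge := (pvF_bounds t hf).1
          simp only [hf, if_false, if_neg (by omega : ¬ pvF t + 1 = -1)]
          rw [show (pvF t + 1).toNat = (pvF t).toNat + 1 from by omega]
          simp

-- cons characterisation of the last-closer index
theorem pvR_cons (c : Char) (t : List Char) :
    pvR (c :: t) = if pvR t = -1 then (if c = '}' ∨ c = ']' then 0 else -1)
      else pvR t + 1 := by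
  have go := pvRfind_ge '}' t
  have ga := pvRfind_ge ']' t
  simp only [pvR, pvRfind_cons]
  rcases eq_or_ne c '}' with h1 | h1
  · subst h1
    have e1 : (('}' : Char) = ']') = False := by simp
    simp only [e1, if_false, if_true, true_or, max_def]
    split_ifs <;> omega
  · rcases eq_or_ne c ']' with h2 | h2
    · subst h2
      have e1 : ((']' : Char) = '}') = False := by simp
      simp only [e1, if_false, if_true, or_true, max_def]
      split_ifs <;> omega
    · have e1 : (c = '}') = False := by simp [h1]
      have e2 : (c = ']') = False := by simp [h2]
      simp only [e1, e2, if_false, false_or, max_def]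
      split_ifs <;> omega

theorem pvR_nil : pvR [] = -1 := by simp [pvR, pvRfind_nil]

theorem pvR_bounds (l : List Char) : -1 ≤ pvR l ∧ pvR l < l.length := by
  induction l with
  | nil => simp [pvR_nil]
  | cons c t ih =>
      obtain ⟨ih1, ih2⟩ := ih
      rw [pvR_cons]
      simp only [List.length_cons]
      split_ifs <;> exact ⟨by omega, by push_cast; omega⟩

-- snoc characterisation of the last-closer index
theorem pvR_snoc (t : List Char) (c : Char) :
    pvR (t ++ [c]) = if c = '}' ∨ c = ']' then (t.length : Int) else pvR t := by
  induction t with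
  | nil => simp [pvR_cons, pvR_nil]
  | cons h r ih =>
      have hb := pvR_bounds r
      have hb2 := pvR_bounds (r ++ [c])
      rw [show (h :: r) ++ [c] = h :: (r ++ [c]) from rfl, pvR_cons, ih, pvR_cons]
      by_cases hc : c = '}' ∨ c = ']'
      · simp only [hc, if_true, List.length_cons]
        rw [if_neg (by omega : ¬ ((r.length : Int) = -1))]
        push_cast; ring
      · simp [hc]

theorem pvRTrim_nil : pvRTrim [] = [] := by
  simp [pvRTrim, pvRTrimGo]

theorem pvRTrim_snoc (t : List Char) (c : Char) :
    pvRTrim (t ++ [c]) = if c == '}' || c == ']' then t ++ [c] else pvRTrim t := by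
  simp only [pvRTrim, List.length_append, List.length_singleton]
  simp [pvRTrimGo, List.getLast?_concat, List.dropLast_concat]

-- the right trim is A's take-to-last-closer
theorem pvRTrim_eq (l : List Char) :
    pvRTrim l = if pvR l = -1 then [] else l.take (pvR l + 1).toNat := by
  induction l using List.reverseRecOn with
  | nil => simp [pvRTrim_nil, pvR_nil]
  | append_singleton t c ih =>
      rw [pvRTrim_snoc, pvR_snoc]
      by_cases hc : c = '}' ∨ c = ']'
      · have hb : (c == '}' || c == ']') = true := by
          rcases hc with h | h <;> simp [h]
        rw [if_pos hb, if_pos hc, if_neg (by omega : ¬ ((t.length : Int) = -1))]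
        rw [show ((t.length : Int) + 1).toNat = t.length + 1 from by omega]
        rw [List.take_of_length_le (by simp)]
      · have hb : (c == '}' || c == ']') = false := by
          simp only [Bool.or_eq_false_iff, beq_eq_false_iff_ne]
          exact ⟨fun h => hc (Or.inl h), fun h => hc (Or.inr h)⟩
        rw [if_neg (by simp [hb]), if_neg hc, ih]
        by_cases hr : pvR t = -1
        · simp [hr]
        · have hbd := pvR_bounds t
          rw [if_neg hr, if_neg hr]
          rw [List.take_append_of_le_length (by omega)]

-- dropping a prefix shifts the last-closer index
theorem pvR_drop (k : Nat) (l : List Char) :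
    pvR (l.drop k) = if pvR l < k then -1 else pvR l - k := by
  induction k generalizing l with
  | zero =>
      have := pvR_bounds l
      simp only [List.drop_zero, Nat.cast_zero]
      split_ifs <;> omega
  | succ k ih =>
      cases l with
      | nil => simp [pvR_nil]
      | cons c t =>
          have hb := pvR_bounds t
          rw [List.drop_succ_cons, ih, pvR_cons]
          obtain ⟨hb1, hb2⟩ := hb
          split_ifs <;> push_cast at * <;> omega

-- A's min over the filtered candidate list equals pvMin2 (as an Option)
theorem pvMin2_eq_minFilter (a b : Int) :
    PySem.List.min? ([a, b].filter (fun i => decide (i ≠ -1))) (fun x => x) =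
      (if pvMin2 a b = -1 then none else some (pvMin2 a b)) := by
  by_cases h1 : a = -1 <;> by_cases h2 : b = -1 <;>
    simp [h1, h2, pvMin2, PySem.List.min?] <;>
    simp [min_def] <;> split_ifs <;> first | rfl | omega

-- ===== VERDICT (by name: the statement is the Claim_ definition above) =====
theorem extract_json_slice_py_spec : Claim_equal_extract_json_slice_py := by
  intro raw _
  unfold Spec_extract_json_slice_py extract_json_slice_py extract_json_slice_py_alt
  simp only [PySem.Str.find_eq, PySem.Str.rfind_eq,
    show "{".toList = ['{'] from rfl, show "[".toList = ['['] from rfl,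
    show "}".toList = ['}'] from rfl, show "]".toList = [']'] from rfl]
  rw [pvMin2_eq_minFilter]
  rw [show pvMin2 (PySem.Chars.find raw.toList ['{']) (PySem.Chars.find raw.toList ['[']) =
      pvF raw.toList from rfl]
  rw [show max (PySem.Chars.rfind raw.toList ['}']) (PySem.Chars.rfind raw.toList [']']) =
      pvR raw.toList from rfl]
  rw [pvLTrim_eq]
  by_cases hm : pvF raw.toList = -1
  · simp [hm]
  · obtain ⟨hm0, hmlt⟩ := pvF_bounds raw.toList hm
    have hRb := pvR_bounds raw.toList
    simp only [if_neg hm]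
    have hsufne : (raw.toList.drop (pvF raw.toList).toNat).isEmpty = false := by
      rw [List.isEmpty_eq_false_iff, ← List.length_pos_iff, List.length_drop]
      omega
    simp only [hsufne, Bool.false_eq_true, if_false]
    rw [pvRTrim_eq, pvR_drop]
    by_cases hend : pvR raw.toList = -1 ∨ pvR raw.toList < pvF raw.toList
    · -- A returns raw[start:], B's right trim is empty and it returns the suffix
      have hlt : pvR raw.toList < ((pvF raw.toList).toNat : Int) := by omega
      have hA : (pvR raw.toList == -1 || decide (pvR raw.toList < pvF raw.toList)) = true := by
        rcases hend with h | h <;> simp [h]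
      rw [if_pos hlt, hA]
      simp only [List.isEmpty_nil, if_true]
      apply String.toList_inj.mp
      rw [PySem.Str.toList_slice, String.toList_ofList, PySem.Chars.slice_eq_listSlice,
        PySem.List.slice_from _ hm0]
    · -- A returns raw[start:end+1], B returns the trimmed suffix
      rw [not_or, not_lt] at hend
      obtain ⟨hne, hge⟩ := hend
      have hA : (pvR raw.toList == -1 || decide (pvR raw.toList < pvF raw.toList)) = false := by
        simp [hne, not_lt.mpr hge]
      have hnlt : ¬ pvR raw.toList < ((pvF raw.toList).toNat : Int) := by omega
      rw [if_neg hnlt, hA]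
      have hcount : (pvR raw.toList - (pvF raw.toList).toNat + 1).toNat =
          (pvR raw.toList + 1).toNat - (pvF raw.toList).toNat := by omega
      have htrimne : ((raw.toList.drop (pvF raw.toList).toNat).take
          (pvR raw.toList - (pvF raw.toList).toNat + 1).toNat).isEmpty = false := by
        rw [List.isEmpty_eq_false_iff, ← List.length_pos_iff, List.length_take, List.length_drop]
        omega
      simp only [Bool.false_eq_true, if_false,
        if_neg (by omega : ¬ pvR raw.toList - ((pvF raw.toList).toNat : Int) = -1), htrimne]
      apply String.toList_inj.mp
      rw [PySem.Str.toList_slice, String.toList_ofList, PySem.Chars.slice_eq_listSlice,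
        PySem.List.slice_toNat _ hm0 (by omega), hcount]
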